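-- pv_equiv track=rewrite | github.com/irmadong/AmazonFoodReviewSentimentAnalysis | source code/features.py | remove_irrelevent
-- ===== SOURCE A (Python) =====
-- def remove_irrelevent(pos_review):
--     '''
--     This function removes the irrelevant bigrams which is lack of sentiment significance.
--     Those are bigrams with pos tag not in the pos clouds and bigrams lack of grammatical
--     structure, such as NN + ADV.
--     :param pos_review: the reviews separated into bigrams with pos tag
--     :return: the bigrams after removal and substitution
--     '''
--
--     # pos clouds
--     pos_cloud_1 = ["JJ", "JJR", "JJS"]
--     pos_cloud_2 = ["RB", "RBR", "RBS"]
--     pos_cloud_3 = ["VB", "VBD", "VBG", "VBN", "VBP", "VBZ"]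
--     pos_cloud_4 = ["NN", "NNS", "NNP", "NNPS", "PRP"]
--
--     review_feature = []
--     for review in pos_review:
--         sent_feature = []
--         for bigrams in review:
--             if bigrams[0][1] in pos_cloud_1:
--                 if bigrams[1][1] in pos_cloud_4:
--                     string = str(bigrams[0][0] + " N")
--                     sent_feature.append(string)
--                 elif bigrams[1][1] in pos_cloud_2:
--                     string = str(bigrams[0][0] + " RB")
--                     sent_feature.append(string)
--                 elif bigrams[1][1] in pos_cloud_1:
--                     string = str(bigrams[0][0] + " " + bigrams[1][0])
--                     sent_feature.append(string)
--             if bigrams[0][1] in pos_cloud_2: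
--                 if bigrams[1][1] in pos_cloud_4:
--                     string = str(bigrams[0][0] + " N")
--                     sent_feature.append(string)
--                 elif bigrams[1][1] in pos_cloud_1 or bigrams[1][1] in pos_cloud_2 or bigrams[1][1] in pos_cloud_3:
--                     string = str(bigrams[0][0] + " " + bigrams[1][0])
--                     sent_feature.append(string)
--             if bigrams[0][1] in pos_cloud_3:
--                 if bigrams[1][1] in pos_cloud_4:
--                     string = str(bigrams[0][0] + " N")
--                     sent_feature.append(string)
--                 elif bigrams[1][1] in pos_cloud_1 or bigrams[1][1] in pos_cloud_2 or bigrams[1][1] in pos_cloud_3: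
--                     string = str(bigrams[0][0] + " " + bigrams[1][0])
--                     sent_feature.append(string)
--             if bigrams[0][1] in pos_cloud_4:
--                 if bigrams[1][1] in pos_cloud_1 or bigrams[1][1] in pos_cloud_2 or bigrams[1][1] in pos_cloud_3:
--                     string = str("N " + bigrams[1][0])
--                     sent_feature.append(string)
--         review_feature.append(sent_feature)
--     return(review_feature)
-- ===== SOURCE B (Python) =====
-- _ADJ = {"JJ", "JJR", "JJS"}
-- _ADV = {"RB", "RBR", "RBS"}
-- _VERB = {"VB", "VBD", "VBG", "VBN", "VBP", "VBZ"}
-- _NOUN = {"NN", "NNS", "NNP", "NNPS", "PRP"}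
--
--
-- def _cloud(tag):
--     if tag in _ADJ:
--         return 1
--     if tag in _ADV:
--         return 2
--     if tag in _VERB:
--         return 3
--     if tag in _NOUN:
--         return 4
--     return 0
--
--
-- def _keep(bg):
--     (_, c1), (_, c2) = bg
--     return c2 and not (c1 == 4 and c2 == 4) and not (c1 == 1 and c2 == 3)
--
--
-- def _render(bg):
--     (w0, c1), (w1, c2) = bg
--     left = "N" if c1 == 4 else w0
--     if c2 == 4:
--         right = "N"
--     elif c1 == 1 and c2 == 2:
--         right = "RB"
--     else:
--         right = w1
--     return left + " " + right
--
--
-- def remove_irrelevent(pos_review):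
--     out = []
--     for review in pos_review:
--         # stage 1: annotate tokens with cloud indices, dropping bigrams whose
--         # first tag lies in no cloud
--         coded = []
--         for b in review:
--             c1 = _cloud(b[0][1])
--             if c1:
--                 coded.append(((b[0][0], c1), (b[1][0], _cloud(b[1][1]))))
--         # stage 2: filter with the keep-predicate
--         kept = [bg for bg in coded if _keep(bg)]
--         # stage 3: render by token substitution
--         out.append([_render(bg) for bg in kept])
--     return out
-- ===== Notes on version B (the rewrite author's own statement) =====
-- stated objective: alternative
-- what changed: Replaces A's single-pass four-way if/elif cascade that builds each string in-branch by a three-stage pipeline per review: annotate tokens with cloud indices (dropping bigrams whose first tag is in no cloud), filter with one keep-predicate, then render each survivor by independent left/right token substitution (noun->'N', JJ+ADV->'RB') joined with a space.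
import Mathlib
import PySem

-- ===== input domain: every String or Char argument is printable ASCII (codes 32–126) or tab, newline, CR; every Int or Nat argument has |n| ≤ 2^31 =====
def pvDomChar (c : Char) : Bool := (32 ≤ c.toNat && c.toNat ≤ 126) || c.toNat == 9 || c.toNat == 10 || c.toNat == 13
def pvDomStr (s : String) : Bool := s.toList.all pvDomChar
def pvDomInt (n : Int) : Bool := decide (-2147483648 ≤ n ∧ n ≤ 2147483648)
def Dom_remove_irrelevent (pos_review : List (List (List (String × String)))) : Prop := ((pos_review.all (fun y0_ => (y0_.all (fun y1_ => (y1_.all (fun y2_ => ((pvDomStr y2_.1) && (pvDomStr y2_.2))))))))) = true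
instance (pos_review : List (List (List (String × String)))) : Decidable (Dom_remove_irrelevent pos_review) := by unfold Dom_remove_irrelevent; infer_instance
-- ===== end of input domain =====

-- B replaces A's single-pass if/elif cascade by a three-stage pipeline per review
-- (annotate with cloud indices, filter with one keep-predicate, render by token
-- substitution); objective: alternative decomposition, same return value on Pre_.

-- ===== PORT A =====
def pvCloud1 : List String := ["JJ", "JJR", "JJS"]
def pvCloud2 : List String := ["RB", "RBR", "RBS"]
def pvCloud3 : List String := ["VB", "VBD", "VBG", "VBN", "VBP", "VBZ"]
def pvCloud4 : List String := ["NN", "NNS", "NNP", "NNPS", "PRP"]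

-- one iteration of A's inner loop body (the four sequential if-blocks, in order)
def pvStepA (sent_feature : List String) (bigrams : List (String × String)) : List String :=
  let b0 := (PySem.List.pyGet? bigrams 0).getD ("", "")
  let s1 :=
    if b0.2 ∈ pvCloud1 then
      let b1 := (PySem.List.pyGet? bigrams 1).getD ("", "")
      if b1.2 ∈ pvCloud4 then sent_feature ++ [b0.1 ++ " N"]
      else if b1.2 ∈ pvCloud2 then sent_feature ++ [b0.1 ++ " RB"]
      else if b1.2 ∈ pvCloud1 then sent_feature ++ [b0.1 ++ " " ++ b1.1]
      else sent_feature
    else sent_feature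
  let s2 :=
    if b0.2 ∈ pvCloud2 then
      let b1 := (PySem.List.pyGet? bigrams 1).getD ("", "")
      if b1.2 ∈ pvCloud4 then s1 ++ [b0.1 ++ " N"]
      else if b1.2 ∈ pvCloud1 ∨ b1.2 ∈ pvCloud2 ∨ b1.2 ∈ pvCloud3 then s1 ++ [b0.1 ++ " " ++ b1.1]
      else s1
    else s1
  let s3 :=
    if b0.2 ∈ pvCloud3 then
      let b1 := (PySem.List.pyGet? bigrams 1).getD ("", "")
      if b1.2 ∈ pvCloud4 then s2 ++ [b0.1 ++ " N"]
      else if b1.2 ∈ pvCloud1 ∨ b1.2 ∈ pvCloud2 ∨ b1.2 ∈ pvCloud3 then s2 ++ [b0.1 ++ " " ++ b1.1]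
      else s2
    else s2
  if b0.2 ∈ pvCloud4 then
    let b1 := (PySem.List.pyGet? bigrams 1).getD ("", "")
    if b1.2 ∈ pvCloud1 ∨ b1.2 ∈ pvCloud2 ∨ b1.2 ∈ pvCloud3 then s3 ++ ["N " ++ b1.1]
    else s3
  else s3

def remove_irrelevent (pos_review : List (List (List (String × String)))) : List (List String) :=
  pos_review.foldl (fun review_feature review =>
    review_feature ++ [review.foldl pvStepA []]) []

-- ===== PORT B =====
-- Source B's set constants (PySem.Set = the distinct elements)
def pvAdjB : PySem.Set String := PySem.Set.ofList ["JJ", "JJR", "JJS"]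
def pvAdvB : PySem.Set String := PySem.Set.ofList ["RB", "RBR", "RBS"]
def pvVerbB : PySem.Set String := PySem.Set.ofList ["VB", "VBD", "VBG", "VBN", "VBP", "VBZ"]
def pvNounB : PySem.Set String := PySem.Set.ofList ["NN", "NNS", "NNP", "NNPS", "PRP"]

def pvCloudB (tag : String) : Int :=
  if tag ∈ pvAdjB then 1
  else if tag ∈ pvAdvB then 2
  else if tag ∈ pvVerbB then 3
  else if tag ∈ pvNounB then 4
  else 0

-- Source B's _keep (int truthiness: c is truthy iff c ≠ 0)
def pvKeepB (bg : (String × Int) × (String × Int)) : Bool :=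
  bg.2.2 ≠ 0 && !(bg.1.2 == 4 && bg.2.2 == 4) && !(bg.1.2 == 1 && bg.2.2 == 3)

-- Source B's _render
def pvRenderB (bg : (String × Int) × (String × Int)) : String :=
  let left := if bg.1.2 = 4 then "N" else bg.1.1
  let right :=
    if bg.2.2 = 4 then "N"
    else if bg.1.2 = 1 ∧ bg.2.2 = 2 then "RB"
    else bg.2.1
  left ++ " " ++ right

-- the per-bigram annotation of Source B's stage-1 loop (append iff the first tag is in a cloud)
def pvCodeB? (b : List (String × String)) : Option ((String × Int) × (String × Int)) :=
  let b0 := (PySem.List.pyGet? b 0).getD ("", "")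
  let c1 := pvCloudB b0.2
  if c1 ≠ 0 then
    let b1 := (PySem.List.pyGet? b 1).getD ("", "")
    some ((b0.1, c1), (b1.1, pvCloudB b1.2))
  else none

def remove_irrelevent_alt (pos_review : List (List (List (String × String)))) : List (List String) :=
  pos_review.foldl (fun out review =>
    let coded := review.filterMap pvCodeB?
    let kept := coded.filter pvKeepB
    out ++ [kept.map pvRenderB]) []

-- ===== PRECONDITION & SPEC =====
-- Pre_ excludes malformed "bigrams" with fewer than two tokens: on an empty one both
-- programs raise IndexError, and on a one-token one both raise IndexError exactly when its
-- tag lies in a pos cloud; Pre_ admits exactly the inputs on which both programs return.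
def pvAllTags : List String :=
  ["JJ", "JJR", "JJS", "RB", "RBR", "RBS", "VB", "VBD", "VBG", "VBN", "VBP", "VBZ",
   "NN", "NNS", "NNP", "NNPS", "PRP"]

def Pre_remove_irrelevent (pos_review : List (List (List (String × String)))) : Prop :=
  ∀ review ∈ pos_review, ∀ b ∈ review,
    2 ≤ b.length ∨ (b.length = 1 ∧ (b.headD ("", "")).2 ∉ pvAllTags)

instance (pos_review : List (List (List (String × String)))) : Decidable (Pre_remove_irrelevent pos_review) := by
  unfold Pre_remove_irrelevent; infer_instance

def pvWitness_remove_irrelevent : (List (List (List (String × String)))) :=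
  [[[("very", "RB"), ("good", "JJ")], [("dog", "NN"), ("runs", "VBZ")]], []]

def Spec_remove_irrelevent (pos_review : List (List (List (String × String)))) (out : List (List String)) : Prop := out = remove_irrelevent_alt pos_review
instance (pos_review : List (List (List (String × String)))) (out : List (List String)) : Decidable (Spec_remove_irrelevent pos_review out) := by unfold Spec_remove_irrelevent; infer_instance

-- ===== CLAIM =====
def Claim_equal_remove_irrelevent : Prop := ∀ (pos_review : List (List (List (String × String)))), Dom_remove_irrelevent pos_review → Pre_remove_irrelevent pos_review → Spec_remove_irrelevent pos_review (remove_irrelevent pos_review)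

-- ===== LEMMAS AND PROOFS =====

-- the four clouds are pairwise disjoint
theorem pvD12 (t : String) (h1 : t ∈ pvCloud1) (h2 : t ∈ pvCloud2) : False := by
  simp [pvCloud1] at h1; rcases h1 with rfl | rfl | rfl <;> simp [pvCloud2] at h2
theorem pvD13 (t : String) (h1 : t ∈ pvCloud1) (h3 : t ∈ pvCloud3) : False := by
  simp [pvCloud1] at h1; rcases h1 with rfl | rfl | rfl <;> simp [pvCloud3] at h3
theorem pvD14 (t : String) (h1 : t ∈ pvCloud1) (h4 : t ∈ pvCloud4) : False := by
  simp [pvCloud1] at h1; rcases h1 with rfl | rfl | rfl <;> simp [pvCloud4] at h4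
theorem pvD23 (t : String) (h2 : t ∈ pvCloud2) (h3 : t ∈ pvCloud3) : False := by
  simp [pvCloud2] at h2; rcases h2 with rfl | rfl | rfl <;> simp [pvCloud3] at h3
theorem pvD24 (t : String) (h2 : t ∈ pvCloud2) (h4 : t ∈ pvCloud4) : False := by
  simp [pvCloud2] at h2; rcases h2 with rfl | rfl | rfl <;> simp [pvCloud4] at h4
theorem pvD34 (t : String) (h3 : t ∈ pvCloud3) (h4 : t ∈ pvCloud4) : False := by
  simp [pvCloud3] at h3; rcases h3 with rfl | rfl | rfl | rfl | rfl | rfl <;> simp [pvCloud4] at h4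

-- B's set membership coincides with A's list membership, cloud by cloud
theorem pvMemAdj (t : String) : t ∈ pvAdjB ↔ t ∈ pvCloud1 := by
  simp [pvAdjB, PySem.Set.mem_ofList, pvCloud1]
theorem pvMemAdv (t : String) : t ∈ pvAdvB ↔ t ∈ pvCloud2 := by
  simp [pvAdvB, PySem.Set.mem_ofList, pvCloud2]
theorem pvMemVerb (t : String) : t ∈ pvVerbB ↔ t ∈ pvCloud3 := by
  simp [pvVerbB, PySem.Set.mem_ofList, pvCloud3]
theorem pvMemNoun (t : String) : t ∈ pvNounB ↔ t ∈ pvCloud4 := by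
  simp [pvNounB, PySem.Set.mem_ofList, pvCloud4]

-- every tag falls in exactly one of five disjoint cases, and pvCloudB computes the index
theorem pvCloudCases (t : String) :
    (pvCloudB t = 0 ∧ t ∉ pvCloud1 ∧ t ∉ pvCloud2 ∧ t ∉ pvCloud3 ∧ t ∉ pvCloud4) ∨
    (pvCloudB t = 1 ∧ t ∈ pvCloud1 ∧ t ∉ pvCloud2 ∧ t ∉ pvCloud3 ∧ t ∉ pvCloud4) ∨
    (pvCloudB t = 2 ∧ t ∉ pvCloud1 ∧ t ∈ pvCloud2 ∧ t ∉ pvCloud3 ∧ t ∉ pvCloud4) ∨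
    (pvCloudB t = 3 ∧ t ∉ pvCloud1 ∧ t ∉ pvCloud2 ∧ t ∈ pvCloud3 ∧ t ∉ pvCloud4) ∨
    (pvCloudB t = 4 ∧ t ∉ pvCloud1 ∧ t ∉ pvCloud2 ∧ t ∉ pvCloud3 ∧ t ∈ pvCloud4) := by
  by_cases h1 : t ∈ pvCloud1
  · exact Or.inr (Or.inl ⟨by simp [pvCloudB, pvMemAdj, h1], h1,
      fun h => pvD12 t h1 h, fun h => pvD13 t h1 h, fun h => pvD14 t h1 h⟩)
  by_cases h2 : t ∈ pvCloud2
  · exact Or.inr (Or.inr (Or.inl ⟨by simp [pvCloudB, pvMemAdj, pvMemAdv, h1, h2], h1, h2,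
      fun h => pvD23 t h2 h, fun h => pvD24 t h2 h⟩))
  by_cases h3 : t ∈ pvCloud3
  · exact Or.inr (Or.inr (Or.inr (Or.inl ⟨by
      simp [pvCloudB, pvMemAdj, pvMemAdv, pvMemVerb, h1, h2, h3], h1, h2, h3,
      fun h => pvD34 t h3 h⟩)))
  by_cases h4 : t ∈ pvCloud4
  · exact Or.inr (Or.inr (Or.inr (Or.inr ⟨by
      simp [pvCloudB, pvMemAdj, pvMemAdv, pvMemVerb, pvMemNoun, h1, h2, h3, h4],
      h1, h2, h3, h4⟩)))
  · exact Or.inl ⟨by simp [pvCloudB, pvMemAdj, pvMemAdv, pvMemVerb, pvMemNoun, h1, h2, h3, h4],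
      h1, h2, h3, h4⟩

theorem pvSpRB : (" " : String) ++ "RB" = " RB" := rfl
theorem pvSpN : (" " : String) ++ "N" = " N" := rfl

-- a tag outside the union of all clouds is in no cloud
theorem pvNotAll (t : String) (h : t ∉ pvAllTags) :
    t ∉ pvCloud1 ∧ t ∉ pvCloud2 ∧ t ∉ pvCloud3 ∧ t ∉ pvCloud4 := by
  simp [pvAllTags] at h
  simp [pvCloud1, pvCloud2, pvCloud3, pvCloud4]
  tauto

-- B's contribution of one bigram
def pvEmitB (b : List (String × String)) : List String :=
  match pvCodeB? b with
  | none => []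
  | some bg => if pvKeepB bg then [pvRenderB bg] else []

theorem pvStepA_eq (sent : List String) (w0 t0 w1 t1 : String) (rest : List (String × String)) :
    pvStepA sent ((w0, t0) :: (w1, t1) :: rest) =
      sent ++ pvEmitB ((w0, t0) :: (w1, t1) :: rest) := by
  have hb0 : PySem.List.pyGet? ((w0, t0) :: (w1, t1) :: rest) 0 = some (w0, t0) :=
    PySem.List.pyGet?_zero_cons _ _
  have hb1 : PySem.List.pyGet? ((w0, t0) :: (w1, t1) :: rest) 1 = some (w1, t1) := by
    simp [PySem.List.pyGet?, PySem.List.pyIdx?]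
  simp only [pvStepA, pvEmitB, pvCodeB?, hb0, hb1, Option.getD_some]
  rcases pvCloudCases t0 with ⟨g0, a1, a2, a3, a4⟩ | ⟨g0, a1, a2, a3, a4⟩ |
      ⟨g0, a1, a2, a3, a4⟩ | ⟨g0, a1, a2, a3, a4⟩ | ⟨g0, a1, a2, a3, a4⟩ <;>
    rcases pvCloudCases t1 with ⟨g1, c1, c2, c3, c4⟩ | ⟨g1, c1, c2, c3, c4⟩ |
        ⟨g1, c1, c2, c3, c4⟩ | ⟨g1, c1, c2, c3, c4⟩ | ⟨g1, c1, c2, c3, c4⟩ <;>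
      simp [pvKeepB, pvRenderB, g0, g1, a1, a2, a3, a4, c1, c2, c3, c4,
        String.append_assoc, pvSpRB, pvSpN]

theorem pvStepA_eq_one (sent : List String) (w0 t0 : String) (h : t0 ∉ pvAllTags) :
    pvStepA sent [(w0, t0)] = sent ++ pvEmitB [(w0, t0)] := by
  obtain ⟨n1, n2, n3, n4⟩ := pvNotAll t0 h
  have g0 : pvCloudB t0 = 0 := by
    rcases pvCloudCases t0 with ⟨g, _⟩ | ⟨_, g, _⟩ | ⟨_, _, g, _⟩ | ⟨_, _, _, g, _⟩ | ⟨_, _, _, _, g⟩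
    · exact g
    all_goals first
      | exact absurd g n1 | exact absurd g n2 | exact absurd g n3 | exact absurd g n4
  simp [pvStepA, pvEmitB, pvCodeB?, n1, n2, n3, n4, g0,
    PySem.List.pyGet?, PySem.List.pyIdx?]

-- B's per-review pipeline collapses bigram by bigram to pvEmitB
theorem pvPipeline_cons (b : List (String × String)) (rest : List (List (String × String))) :
    ((List.filterMap pvCodeB? (b :: rest)).filter pvKeepB).map pvRenderB =
      pvEmitB b ++ ((List.filterMap pvCodeB? rest).filter pvKeepB).map pvRenderB := by
  simp only [List.filterMap_cons, pvEmitB]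
  cases hc : pvCodeB? b with
  | none => simp
  | some bg =>
    simp only [List.filter_cons]
    by_cases h : pvKeepB bg <;> simp [h]

theorem review_eq (review : List (List (String × String))) (sent : List String)
    (h : ∀ b ∈ review, 2 ≤ b.length ∨ (b.length = 1 ∧ (b.headD ("", "")).2 ∉ pvAllTags)) :
    review.foldl pvStepA sent =
      sent ++ ((review.filterMap pvCodeB?).filter pvKeepB).map pvRenderB := by
  induction review generalizing sent with
  | nil => simp
  | cons b rest ih =>
    have hstep : pvStepA sent b = sent ++ pvEmitB b := by
      match b, h b List.mem_cons_self with
      | [], hb => simp at hb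
      | [(w0, t0)], hb =>
        rcases hb with hb | ⟨_, hb⟩
        · simp at hb
        · exact pvStepA_eq_one sent w0 t0 hb
      | (w0, t0) :: (w1, t1) :: br, _ => exact pvStepA_eq sent w0 t0 w1 t1 br
    rw [List.foldl_cons, hstep, ih _ (fun x hx => h x (List.mem_cons_of_mem _ hx)),
      pvPipeline_cons, List.append_assoc]

theorem pvFoldAcc {a b : Type} (g : b -> List a) (xs : List b) (acc : List (List a)) :
    xs.foldl (fun s r => s ++ [g r]) acc = acc ++ xs.foldl (fun s r => s ++ [g r]) [] := by
  induction xs generalizing acc with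
  | nil => simp
  | cons x xs ih =>
    simp only [List.foldl_cons]
    rw [ih (acc ++ [g x]), ih ([] ++ [g x])]
    simp

theorem pvMain (l : List (List (List (String × String))))
    (hpre : ∀ review ∈ l, ∀ b ∈ review,
      2 ≤ b.length ∨ (b.length = 1 ∧ (b.headD ("", "")).2 ∉ pvAllTags)) :
    remove_irrelevent l = remove_irrelevent_alt l := by
  unfold remove_irrelevent remove_irrelevent_alt
  induction l with
  | nil => rfl
  | cons review rest ih =>
    have ih' := ih (fun r hr => hpre r (List.mem_cons_of_mem _ hr))
    have hr := review_eq review [] (hpre review List.mem_cons_self)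
    simp only [List.foldl_cons, List.nil_append] at hr ⊢
    rw [pvFoldAcc (fun (review : List (List (String × String))) => review.foldl pvStepA []),
      pvFoldAcc (fun (review : List (List (String × String))) =>
        ((review.filterMap pvCodeB?).filter pvKeepB).map pvRenderB),
      hr, ih']

-- ===== VERDICT =====
theorem remove_irrelevent_spec : Claim_equal_remove_irrelevent := by
  intro pos_review _ hpre
  unfold Spec_remove_irrelevent
  exact pvMain pos_review hpre
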